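-- pv_equiv track=rewrite | github.com/shesha4572/12 | t4.py | statistic
-- ===== SOURCE A (Python) =====
-- def statistic(str):
--    words = len(str.split())
--    upp_case = 0
--    low_case = 0
--    digit = 0
--    alpha = 0
--    for i in str:
--        if i.isupper():
--            upp_case += 1
--            alpha += 1
--        elif i.islower():
--            low_case += 1
--            alpha += 1
--        elif i.isdigit():
--            digit += 1
--    return words, low_case, upp_case, digit, alpha
-- ===== SOURCE B (Python) =====
-- def statistic(str):
--     words = len(str.split())
--     upp_case = sum(1 for c in str if c.isupper())
--     low_case = sum(1 for c in str if c.islower())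
--     digit = sum(1 for c in str if c.isdigit())
--     return words, low_case, upp_case, digit, upp_case + low_case
-- ===== Notes on version B (the rewrite author's own statement) =====
-- stated objective: simpler
-- what changed: Replaces the single stateful branching loop with independent counting scans (one per category) and derives alpha as upp_case + low_case instead of tracking it in the loop.
import Mathlib
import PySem

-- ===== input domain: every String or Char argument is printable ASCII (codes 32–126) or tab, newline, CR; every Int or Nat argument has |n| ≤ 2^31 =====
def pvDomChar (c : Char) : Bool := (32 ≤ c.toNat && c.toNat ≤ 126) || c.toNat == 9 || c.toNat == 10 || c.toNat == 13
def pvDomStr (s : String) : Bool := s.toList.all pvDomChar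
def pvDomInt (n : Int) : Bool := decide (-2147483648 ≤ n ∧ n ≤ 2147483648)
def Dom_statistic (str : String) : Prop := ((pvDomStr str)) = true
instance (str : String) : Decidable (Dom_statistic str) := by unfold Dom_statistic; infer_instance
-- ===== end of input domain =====

-- B replaces A's single stateful branching loop by independent per-category counts, deriving alpha = upp + low: simpler decomposition.

-- ===== PORT A =====
-- A: one loop carrying (upp_case, low_case, digit, alpha) with if/elif branches.
def statistic (str : String) : Int × Int × Int × Int × Int :=
  let words : Int := (PySem.Str.split₀ str).length
  let st := str.toList.foldl
    (fun (s : Int × Int × Int × Int) i =>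
      let (upp, low, dig, al) := s
      if PySem.Chars.isupper i then (upp + 1, low, dig, al + 1)
      else if PySem.Chars.islower i then (upp, low + 1, dig, al + 1)
      else if PySem.Chars.isdigit i then (upp, low, dig + 1, al)
      else s)
    (0, 0, 0, 0)
  (words, st.2.1, st.1, st.2.2.1, st.2.2.2)

-- ===== PORT B =====
-- B: independent counting passes (sum(1 for c in str if …) ported as countP), alpha derived.
def statistic_alt (str : String) : Int × Int × Int × Int × Int :=
  let words : Int := (PySem.Str.split₀ str).length
  let upp : Int := (str.toList.countP PySem.Chars.isupper : Nat)
  let low : Int := (str.toList.countP PySem.Chars.islower : Nat)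
  let dig : Int := (str.toList.countP PySem.Chars.isdigit : Nat)
  (words, low, upp, dig, upp + low)

-- ===== PRECONDITION & SPEC =====
def Spec_statistic (str : String) (out : Int × Int × Int × Int × Int) : Prop := out = statistic_alt str
instance (str : String) (out : Int × Int × Int × Int × Int) : Decidable (Spec_statistic str out) := by unfold Spec_statistic; infer_instance

-- ===== CLAIM (what is proved, stated in full; the proofs are below) =====
def Claim_equal_statistic : Prop := ∀ (str : String), Dom_statistic str → Spec_statistic str (statistic str)

-- ===== LEMMAS AND PROOFS =====

-- Loop invariant: A's fold equals the three independent counts, with alpha = upper-count + lower-count.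
theorem statistic_loop_inv (l : List Char) (u lo d a : Int) :
    l.foldl
      (fun (s : Int × Int × Int × Int) i =>
        let (upp, low, dig, al) := s
        if PySem.Chars.isupper i then (upp + 1, low, dig, al + 1)
        else if PySem.Chars.islower i then (upp, low + 1, dig, al + 1)
        else if PySem.Chars.isdigit i then (upp, low, dig + 1, al)
        else s)
      (u, lo, d, a)
    = (u + (l.countP PySem.Chars.isupper : Nat),
       lo + (l.countP PySem.Chars.islower : Nat),
       d + (l.countP (fun i => !PySem.Chars.isupper i && !PySem.Chars.islower i && PySem.Chars.isdigit i) : Nat),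
       a + (l.countP PySem.Chars.isupper : Nat) + (l.countP PySem.Chars.islower : Nat)) := by
  induction l generalizing u lo d a with
  | nil => simp
  | cons c t ih =>
    simp only [List.foldl_cons]
    by_cases h1 : PySem.Chars.isupper c = true
    · have h2 : PySem.Chars.islower c = false := by
        revert h1; simp [PySem.Chars.isupper, PySem.Chars.islower, Char.le_def, UInt32.le_iff_toNat_le]; omega
      simp [h1, h2, ih]
      omega
    · by_cases h2 : PySem.Chars.islower c = true
      · simp [h1, h2, ih]
        omega
      · by_cases h3 : PySem.Chars.isdigit c = true
        · simp [h1, h2, h3, ih]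
          omega
        · simp [h1, h2, h3, ih]

theorem digit_count_eq (l : List Char) :
    l.countP (fun i => !PySem.Chars.isupper i && !PySem.Chars.islower i && PySem.Chars.isdigit i)
      = l.countP PySem.Chars.isdigit := by
  apply List.countP_congr
  intro c _
  constructor
  · intro h; simp at h; exact h.2
  · intro h
    have h1 : PySem.Chars.isupper c = false := by
      revert h; simp [PySem.Chars.isupper, PySem.Chars.isdigit, Char.le_def, UInt32.le_iff_toNat_le]; omega
    have h2 : PySem.Chars.islower c = false := by
      revert h; simp [PySem.Chars.islower, PySem.Chars.isdigit, Char.le_def, UInt32.le_iff_toNat_le]; omega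
    simp [h, h1, h2]

-- ===== VERDICT (by name: the statement is the Claim_ definition above) =====
theorem statistic_spec : Claim_equal_statistic := by
  intro str _
  unfold Spec_statistic statistic statistic_alt
  simp only [statistic_loop_inv, digit_count_eq]
  simp [add_comm]
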